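-- pv_equiv track=rewrite | github.com/EdgeLake/EdgeLake | edge_lake/generic/utils_data.py | get_compiled_str
-- ===== SOURCE A (Python) =====
-- def get_compiled_str(source_str):
--     compiled_str = ""
--
--     length = len(source_str)
--     offset = 0
--
--     while offset < length:
--         special_char = False
--         first_char = source_str[offset:offset + 1]
--         compiled_char = first_char
--         if first_char == '\\':
--             if offset + 1 < length:
--                 second_char = source_str[offset + 1:offset + 2]
--                 if second_char == 'n':
--                     compiled_char = '\n'
--                     special_char = True
--
--         compiled_str += compiled_char
--
--         if special_char:
--             offset += 2
--         else:
--             offset += 1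
--
--     return compiled_str
-- ===== SOURCE B (Python) =====
-- def get_compiled_str(source_str):
--     # Tokenize on the two-char literal delimiter, then join with real newlines.
--     return "\n".join(source_str.split("\\n"))
-- ===== Notes on version B (the rewrite author's own statement) =====
-- stated objective: faster
-- what changed: Replaces A's per-character state-machine loop with quadratic string concatenation by a tokenize-then-concatenate strategy: split on the two-char backslash-n delimiter into a list of fragments and join the fragments with a newline.
import Mathlib
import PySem

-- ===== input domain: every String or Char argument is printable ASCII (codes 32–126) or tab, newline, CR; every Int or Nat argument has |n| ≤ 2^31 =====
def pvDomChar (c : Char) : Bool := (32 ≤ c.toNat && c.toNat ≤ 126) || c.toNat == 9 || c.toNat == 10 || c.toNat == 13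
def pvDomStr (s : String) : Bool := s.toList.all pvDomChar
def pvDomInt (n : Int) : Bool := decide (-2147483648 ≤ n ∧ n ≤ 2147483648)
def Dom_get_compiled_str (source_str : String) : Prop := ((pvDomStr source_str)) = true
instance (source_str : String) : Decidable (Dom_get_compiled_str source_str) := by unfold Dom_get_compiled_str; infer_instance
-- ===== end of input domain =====

-- B replaces A's per-character state machine by split on "\n" then join with newline (simpler).

-- ===== PORT A =====
-- A's while loop over offsets: at each step read one char; if it is '\' and the next
-- char is 'n', emit '\n' and advance by 2, else emit the char and advance by 1.
-- Ported as the structural recursion over the remaining code points.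
def getCompiledLoop : List Char → List Char
  | [] => []
  | '\\' :: 'n' :: rest => '\n' :: getCompiledLoop rest
  | c :: rest => c :: getCompiledLoop rest

def get_compiled_str (source_str : String) : String :=
  String.ofList (getCompiledLoop source_str.toList)

-- ===== PORT B =====
-- Source B: "\n".join(source_str.split("\\n")); the separator is nonempty, so split is Chars.splitOn.
def get_compiled_str_alt (source_str : String) : String :=
  String.ofList (PySem.Chars.join ['\n'] (PySem.Chars.splitOn source_str.toList ['\\', 'n']))

-- ===== PRECONDITION & SPEC =====
def Spec_get_compiled_str (source_str : String) (out : String) : Prop := out = get_compiled_str_alt source_str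
instance (source_str : String) (out : String) : Decidable (Spec_get_compiled_str source_str out) := by unfold Spec_get_compiled_str; infer_instance

-- ===== CLAIM (what is proved, stated in full; the proofs are below) =====
def Claim_equal_get_compiled_str : Prop := ∀ (source_str : String), Dom_get_compiled_str source_str → Spec_get_compiled_str source_str (get_compiled_str source_str)

-- ===== LEMMAS AND PROOFS =====

-- The fragments between occurrences of "\n", scanned left to right with the
-- accumulated current fragment `pre`; characterises PySem.Chars.splitOn.go.
def splitRec (pre : List Char) : List Char → List (List Char)
  | [] => [pre]
  | '\\' :: 'n' :: rest => pre :: splitRec [] rest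
  | c :: rest => splitRec (pre ++ [c]) rest

theorem splitRec_cons (pre : List Char) (c : Char) (rest : List Char)
    (h : ¬ (c = '\\' ∧ ∃ t, rest = 'n' :: t)) :
    splitRec pre (c :: rest) = splitRec (pre ++ [c]) rest := by
  rw [splitRec.eq_def]
  split <;> simp_all

theorem getCompiledLoop_cons (c : Char) (rest : List Char)
    (h : ¬ (c = '\\' ∧ ∃ t, rest = 'n' :: t)) :
    getCompiledLoop (c :: rest) = c :: getCompiledLoop rest := by
  rw [getCompiledLoop.eq_def]
  split <;> simp_all

theorem splitRec_ne_nil (pre cs : List Char) : splitRec pre cs ≠ [] := by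
  induction pre, cs using splitRec.induct <;> simp_all [splitRec]

theorem splitOn_go_eq (fuel : Nat) (l cur : List Char) (acc : List (List Char))
    (h : l.length < fuel) :
    PySem.Chars.splitOn.go ['\\', 'n'] fuel l cur acc
      = acc.reverse ++ splitRec cur.reverse l := by
  induction fuel generalizing l cur acc with
  | zero => omega
  | succ fuel ih =>
    match l with
    | [] => simp [PySem.Chars.splitOn.go, splitRec]
    | '\\' :: 'n' :: rest =>
      have hp : List.isPrefixOf ['\\', 'n'] ('\\' :: 'n' :: rest) = true := by
        simp [List.isPrefixOf]
      simp only [PySem.Chars.splitOn.go, hp, if_pos]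
      rw [ih]
      · simp [splitRec]
      · simp at h ⊢; omega
    | c :: rest =>
      by_cases hshape : c = '\\' ∧ ∃ t, rest = 'n' :: t
      · obtain ⟨rfl, t, rfl⟩ := hshape
        have hp : List.isPrefixOf ['\\', 'n'] ('\\' :: 'n' :: t) = true := by
          simp [List.isPrefixOf]
        simp only [PySem.Chars.splitOn.go, hp, if_pos]
        rw [ih]
        · simp [splitRec]
        · simp at h ⊢; omega
      · have hp : List.isPrefixOf ['\\', 'n'] (c :: rest) = false := by
          rcases rest with _ | ⟨d, t⟩ <;> simp [List.isPrefixOf] <;>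
            intro hc <;> subst hc <;> simp_all [eq_comm]
        simp only [PySem.Chars.splitOn.go, hp, Bool.false_eq_true, if_neg,
          not_false_iff]
        rw [ih]
        · rw [splitRec_cons _ _ _ hshape]; simp
        · simp at h ⊢; omega

theorem join_splitRec (cs : List Char) (pre : List Char) :
    PySem.Chars.join ['\n'] (splitRec pre cs) = pre ++ getCompiledLoop cs := by
  induction pre, cs using splitRec.induct with
  | case1 pre => simp [splitRec, getCompiledLoop, PySem.Chars.join, List.intercalate]
  | case2 pre rest ih =>
    obtain ⟨p, ps, hs⟩ := List.exists_cons_of_ne_nil (splitRec_ne_nil [] rest)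
    rw [splitRec, getCompiledLoop, hs]
    rw [hs] at ih
    have hj : PySem.Chars.join ['\n'] (pre :: p :: ps)
        = pre ++ ['\n'] ++ PySem.Chars.join ['\n'] (p :: ps) := by
      simp [PySem.Chars.join, List.intercalate, List.intersperse]
    rw [hj, ih]
    simp
  | case3 pre c rest h1 ih =>
    have hne : ¬ (c = '\\' ∧ ∃ t, rest = 'n' :: t) := by
      rintro ⟨rfl, t, rfl⟩; exact h1 t rfl rfl
    rw [splitRec_cons _ _ _ hne, ih, getCompiledLoop_cons _ _ hne]
    simp

-- ===== VERDICT (by name: the statement is the Claim_ definition above) =====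
theorem get_compiled_str_spec : Claim_equal_get_compiled_str := by
  intro s _
  unfold Spec_get_compiled_str get_compiled_str get_compiled_str_alt PySem.Chars.splitOn
  rw [splitOn_go_eq _ _ _ _ (by omega)]
  simp [join_splitRec]
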